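-- pv_equiv track=rewrite | github.com/PierreLoiez/Euler | solutions/1-100/euler_54.py | ofAKind
-- ===== SOURCE A (Python) =====
-- def ofAKind(hand):
--     best = 0
--     bestStr = 0
--     for i in range(len(hand)-1):
--         card = hand[i]
--         count = 1
--         for j in range(i+1, len(hand)):
--             otherCard = hand[j]
--             if otherCard[0] == card[0]:
--                 count +=1
--         if count >= best:
--             best = count
--             bestStr = card[0]
--     return best, bestStr
-- ===== SOURCE B (Python) =====
-- def ofAKind(hand):
--     # One backward pass with an incremental suffix counter: O(n) instead of A's
--     # nested suffix scans. The last card is counted but is never a candidate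
--     # (A's loop stops at len(hand)-1), so it only seeds the counter.
--     best = 0
--     bestStr = 0
--     counts = {}
--     if hand:
--         counts[hand[-1][0]] = 1
--     for card in reversed(hand[:-1]):
--         rank = card[0]
--         cnt = counts.get(rank, 0) + 1
--         counts[rank] = cnt
--         if cnt > best:
--             best, bestStr = cnt, rank
--     return best, bestStr
-- ===== Notes on version B (the rewrite author's own statement) =====
-- stated objective: faster
-- what changed: Replaces the nested suffix-rescanning loops by a single backward pass that maintains an incremental rank counter; a strict '>' while scanning right-to-left reproduces A's '>=' last-wins tie-break.
-- outside the precondition, e.g. on ofAKind([]): A returns (0, 0), B returns (0, 0); on ofAKind([('A', 'S')]): A returns (0, 0), B returns (0, 0)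
import Mathlib
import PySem

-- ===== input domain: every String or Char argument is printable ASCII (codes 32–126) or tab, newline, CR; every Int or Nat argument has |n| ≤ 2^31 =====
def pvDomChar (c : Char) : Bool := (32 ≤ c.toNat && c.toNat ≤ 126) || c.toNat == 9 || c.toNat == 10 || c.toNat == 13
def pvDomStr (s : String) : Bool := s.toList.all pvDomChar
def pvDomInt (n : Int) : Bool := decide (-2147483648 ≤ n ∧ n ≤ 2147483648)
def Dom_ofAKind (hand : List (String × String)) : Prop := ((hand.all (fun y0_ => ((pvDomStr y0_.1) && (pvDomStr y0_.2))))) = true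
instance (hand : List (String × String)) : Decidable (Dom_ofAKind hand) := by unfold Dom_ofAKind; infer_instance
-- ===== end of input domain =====

-- B replaces A's nested suffix rescans by one backward pass with an incremental rank counter (O(n) vs O(n^2)).

-- ===== PORT A =====
-- Literal port of A's nested index loops. Python's bestStr starts as the int 0; under
-- Pre_ofAKind (length ≥ 2) the i = 0 iteration always overwrites it, so "" stands in.
def ofAKind (hand : List (String × String)) : Int × String :=
  (PySem.List.pyRange 0 ((hand.length : Int) - 1)).foldl
    (fun (st : Int × String) i =>
      let card := PySem.List.pyGetD hand i ("", "")
      let count := (PySem.List.pyRange (i + 1) (hand.length : Int)).foldl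
        (fun c j =>
          let otherCard := PySem.List.pyGetD hand j ("", "")
          if otherCard.1 == card.1 then c + 1 else c) (1 : Int)
      if st.1 ≤ count then (count, card.1) else st)
    ((0 : Int), "")

-- ===== PORT B =====
-- Literal port of Source B: seed the counter with the last card, then one pass over
-- reversed(hand[:-1]) maintaining (best, bestStr, counts); bestStr's int-0 sentinel is "".
def ofAKind_alt (hand : List (String × String)) : Int × String :=
  let counts0 : PySem.Dict String Int :=
    match PySem.List.pyGet? hand (-1) with
    | some last => PySem.Dict.empty.insert last.1 1
    | none => PySem.Dict.empty
  let st := ((PySem.List.slice hand none (some (-1))).reverse).foldl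
    (fun (st : Int × String × PySem.Dict String Int) card =>
      let cnt := st.2.2.getD card.1 0 + 1
      let counts := st.2.2.insert card.1 cnt
      if st.1 < cnt then (cnt, card.1, counts) else (st.1, st.2.1, counts))
    ((0 : Int), "", counts0)
  (st.1, st.2.1)

-- ===== PRECONDITION & SPEC =====
-- Pre_ excludes hands of length < 2: there A (and B in Python) return bestStr = 0, an int
-- sentinel where a rank string is expected — not a value of the declared return type.
def Pre_ofAKind (hand : List (String × String)) : Prop := 2 ≤ hand.length
instance (hand : List (String × String)) : Decidable (Pre_ofAKind hand) := by unfold Pre_ofAKind; infer_instance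

def pvWitness_ofAKind : (List (String × String)) := [("A", "S"), ("A", "H")]

def Spec_ofAKind (hand : List (String × String)) (out : Int × String) : Prop := out = ofAKind_alt hand
instance (hand : List (String × String)) (out : Int × String) : Decidable (Spec_ofAKind hand out) := by unfold Spec_ofAKind; infer_instance

-- ===== CLAIM (what is proved, stated in full; the proofs are below) =====
def Claim_equal_ofAKind : Prop := ∀ (hand : List (String × String)), Dom_ofAKind hand → Pre_ofAKind hand → Spec_ofAKind hand (ofAKind hand)

-- ===== LEMMAS AND PROOFS =====

-- Reference recursion both ports are reduced to: process the hand from the front,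
-- cnt = multiplicity of the head rank in the whole suffix, later candidates win ties.
def pvG : List (String × String) → Int × String
  | [] => (0, "")
  | [_] => (0, "")
  | c :: d :: rest =>
    let cnt : Int := 1 + (((d :: rest).map Prod.fst).count c.1 : Int)
    let r := pvG (d :: rest)
    if r.1 < cnt then (cnt, c.1) else r

-- The (count, rank) candidate sequence A's outer loop runs over, and A's update rule.
def pvPairs : List (String × String) → List (Int × String)
  | [] => []
  | [_] => []
  | c :: d :: rest => (1 + (((d :: rest).map Prod.fst).count c.1 : Int), c.1) :: pvPairs (d :: rest)

def pvStep (st p : Int × String) : Int × String := if st.1 ≤ p.1 then p else st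

lemma pvPairs_nonneg : ∀ (l : List (String × String)) (p : Int × String), p ∈ pvPairs l → 0 ≤ p.1 := by
  intro l
  induction l with
  | nil => intro p hp; simp [pvPairs] at hp
  | cons c t ih =>
    intro p hp
    cases t with
    | nil => simp [pvPairs] at hp
    | cons d rest =>
      rw [pvPairs] at hp
      rcases List.mem_cons.mp hp with h | h
      · subst h; positivity
      · exact ih p h

-- Key lemma: a running-max fold from an arbitrary start (b, s) either keeps (b, s)
-- or produces exactly the fold-from-zero result.
lemma pvKL : ∀ (ps : List (Int × String)), (∀ p ∈ ps, 0 ≤ p.1) → ps ≠ [] → ∀ (b : Int) (s : String),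
    ps.foldl pvStep (b, s)
      = (if b ≤ (ps.foldl pvStep ((0 : Int), "")).1 then ps.foldl pvStep ((0 : Int), "") else (b, s)) := by
  intro ps
  induction ps with
  | nil => intro _ h; exact absurd rfl h
  | cons p tl ih =>
    intro hnn _ b s
    obtain ⟨c, r⟩ := p
    have hc : (0 : Int) ≤ c := hnn (c, r) (List.mem_cons_self)
    have hnn' : ∀ p ∈ tl, 0 ≤ p.1 := fun p hp => hnn p (List.mem_cons_of_mem _ hp)
    cases tl with
    | nil =>
      simp only [List.foldl_cons, List.foldl_nil, pvStep]
      split_ifs <;> simp_all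
    | cons q tl' =>
      have hne : q :: tl' ≠ [] := by simp
      have e1 : ∀ (x : Int × String), List.foldl pvStep x ((c, r) :: q :: tl')
          = List.foldl pvStep (pvStep x (c, r)) (q :: tl') := fun x => List.foldl_cons ..
      rw [e1, e1]
      rw [show pvStep ((0 : Int), "") (c, r) = (c, r) by simp [pvStep, hc]]
      rcases h0 : List.foldl pvStep ((0 : Int), "") (q :: tl') with ⟨b0, s0⟩
      by_cases hbc : b ≤ c
      · rw [show pvStep (b, s) (c, r) = (c, r) by simp [pvStep, hbc]]
        rw [ih hnn' hne c r, h0]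
        split_ifs <;> first | rfl | (exfalso; omega)
      · rw [show pvStep (b, s) (c, r) = (b, s) by simp [pvStep]; omega]
        rw [ih hnn' hne b s, ih hnn' hne c r, h0]
        split_ifs <;> first | rfl | (exfalso; omega)

-- The reference recursion computes the pvStep-fold over the candidate sequence.
lemma pvPairs_foldl_eq_pvG : ∀ (hand : List (String × String)),
    (pvPairs hand).foldl pvStep ((0 : Int), "") = pvG hand := by
  intro hand
  induction hand with
  | nil => rfl
  | cons c t ih =>
    cases t with
    | nil => rfl
    | cons d rest =>
      rw [pvPairs, pvG]
      set cnt : Int := 1 + (((d :: rest).map Prod.fst).count c.1 : Int) with hcnt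
      have hcpos : (1 : Int) ≤ cnt := by rw [hcnt]; omega
      rw [List.foldl_cons]
      rw [show pvStep ((0 : Int), "") (cnt, c.1) = (cnt, c.1) by simp [pvStep]; omega]
      cases rest with
      | nil => simp [pvPairs, pvG]; omega
      | cons e rest' =>
        have hne : pvPairs (d :: e :: rest') ≠ [] := by rw [pvPairs]; simp
        rw [pvKL _ (pvPairs_nonneg _) hne cnt c.1, ih]
        rcases hlt : pvG (d :: e :: rest') with ⟨b, s⟩
        simp only []
        split_ifs <;> simp_all <;> omega

-- A's inner loop counts the head rank in the suffix.
lemma pvInner (hand : List (String × String)) (r : String) :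
    ∀ (k m : Nat), m + k = hand.length → ∀ (c0 : Int),
    (PySem.List.pyRange (m : Int) (hand.length : Int)).foldl
      (fun c j => if (PySem.List.pyGetD hand j ("", "")).1 == r then c + 1 else c) c0
    = c0 + (((hand.drop m).map Prod.fst).count r : Int) := by
  intro k
  induction k with
  | zero =>
    intro m hm c0
    have h1 : (hand.length : Int) ≤ (m : Int) := by omega
    rw [show PySem.List.pyRange (m : Int) (hand.length : Int) = [] by
      simp [PySem.List.pyRange]; omega]
    simp [List.drop_of_length_le (by omega : hand.length ≤ m)]
  | succ k ih =>
    intro m hm c0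
    have hml : m < hand.length := by omega
    rw [PySem.List.pyRange_one_cons (by exact_mod_cast hml)]
    rw [List.foldl_cons]
    rw [PySem.List.pyGetD_natCast hand m ("", ""), List.getD_eq_getElem hand ("", "") hml]
    rw [show ((m : Int) + 1) = ((m + 1 : Nat) : Int) by push_cast; ring]
    rw [ih (m + 1) (by omega)]
    rw [List.drop_eq_getElem_cons hml]
    simp only [List.map_cons, List.count_cons]
    by_cases hb : hand[m].1 = r
    · rw [if_pos (by simp [hb] : (hand[m].1 == r) = true), if_pos (by simp [hb])]
      try push_cast
      try omega
    · rw [if_neg (by simp [hb]), beq_eq_false_iff_ne.mpr hb]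
      try simp
      try omega

-- A's outer loop is the pvStep-fold over the candidate sequence.
lemma pvOuter (hand : List (String × String)) :
    ∀ (k m : Nat), m + k + 1 = hand.length → ∀ (st : Int × String),
    (PySem.List.pyRange (m : Int) ((hand.length : Int) - 1)).foldl
      (fun (st : Int × String) i =>
        let card := PySem.List.pyGetD hand i ("", "")
        let count := (PySem.List.pyRange (i + 1) (hand.length : Int)).foldl
          (fun c j =>
            let otherCard := PySem.List.pyGetD hand j ("", "")
            if otherCard.1 == card.1 then c + 1 else c) (1 : Int)
        if st.1 ≤ count then (count, card.1) else st) st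
    = (pvPairs (hand.drop m)).foldl pvStep st := by
  intro k
  induction k with
  | zero =>
    intro m hm st
    rw [show PySem.List.pyRange (m : Int) ((hand.length : Int) - 1) = [] by
      simp [PySem.List.pyRange]; omega]
    have hlen : (hand.drop m).length = 1 := by rw [List.length_drop]; omega
    obtain ⟨a, ha⟩ := List.length_eq_one_iff.mp hlen
    rw [ha]
    rfl
  | succ k ih =>
    intro m hm st
    have hml : m < hand.length := by omega
    have hml1 : m + 1 < hand.length := by omega
    rw [PySem.List.pyRange_one_cons (by omega : (m : Int) < (hand.length : Int) - 1)]
    rw [List.foldl_cons]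
    simp only []
    rw [PySem.List.pyGetD_natCast hand m ("", ""), List.getD_eq_getElem hand ("", "") hml]
    rw [show ((m : Int) + 1) = ((m + 1 : Nat) : Int) by push_cast; ring]
    rw [pvInner hand hand[m].1 (k + 1) (m + 1) (by omega) 1]
    rw [ih (m + 1) (by omega)]
    rw [List.drop_eq_getElem_cons hml, List.drop_eq_getElem_cons hml1]
    rw [pvPairs, List.foldl_cons]
    rw [← List.drop_eq_getElem_cons hml1]
    rfl

-- Port A computes the reference recursion.
lemma pvA_eq (hand : List (String × String)) (h : hand ≠ []) : ofAKind hand = pvG hand := by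
  rw [← pvPairs_foldl_eq_pvG]
  have hlen : 1 ≤ hand.length := List.length_pos_iff.mpr h
  unfold ofAKind
  rw [show (0 : Int) = ((0 : Nat) : Int) from rfl]
  rw [pvOuter hand (hand.length - 1) 0 (by omega)]
  rw [List.drop_zero]

-- Seed lookups: the last card contributes 1 to its own rank, 0 to the others.
lemma pvSeed_getD (last : String × String) (r : String) :
    (PySem.Dict.empty.insert last.1 (1 : Int)).getD r 0 = if r = last.1 then 1 else 0 := by
  rw [PySem.Dict.getD_insert]
  split_ifs <;> simp [PySem.Dict.getD_empty]

-- Invariant of B's backward pass: after folding (the reverse of) ys over the seeded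
-- counter, best/bestStr are pvG (ys ++ [last]) and counts is the suffix counter.
lemma pvB_inv (last : String × String) : ∀ (ys : List (String × String)),
    (ys.reverse).foldl
      (fun (st : Int × String × PySem.Dict String Int) card =>
        let cnt := st.2.2.getD card.1 0 + 1
        let counts := st.2.2.insert card.1 cnt
        if st.1 < cnt then (cnt, card.1, counts) else (st.1, st.2.1, counts))
      ((0 : Int), "", PySem.Dict.empty.insert last.1 (1 : Int))
    = ((pvG (ys ++ [last])).1, (pvG (ys ++ [last])).2,
       ((ys.map Prod.fst).reverse).foldl (fun d x => d.insert x (d.getD x 0 + 1))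
         (PySem.Dict.empty.insert last.1 (1 : Int))) := by
  intro ys
  induction ys with
  | nil => rfl
  | cons c tl ih =>
    rw [List.reverse_cons, List.foldl_concat, ih]
    simp only []
    have hcnt : (((tl.map Prod.fst).reverse).foldl (fun d x => d.insert x (d.getD x 0 + 1))
        (PySem.Dict.empty.insert last.1 (1 : Int))).getD c.1 0 + 1
        = 1 + ((((tl ++ [last]).map Prod.fst)).count c.1 : Int) := by
      rw [PySem.Dict.getD_foldl_insert_add_one]
      rw [pvSeed_getD, List.count_reverse]
      rw [List.map_append, List.count_append]
      simp only [List.map_cons, List.map_nil, List.count_cons, List.count_nil]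
      by_cases h : c.1 = last.1
      · rw [if_pos h, show (last.1 == c.1) = true by simp [h]]
        simp
        omega
      · rw [if_neg h, beq_eq_false_iff_ne.mpr (Ne.symm h)]
        simp
        omega
    rcases htl : tl ++ [last] with _ | ⟨d, rest⟩
    · exact absurd htl (by simp)
    · rw [show (c :: tl ++ [last]) = c :: d :: rest by rw [← htl]; rfl]
      rw [pvG]
      simp only [← htl, hcnt]
      rw [List.map_cons, List.reverse_cons, List.foldl_concat]
      set C := (tl.map Prod.fst).reverse.foldl (fun d x => d.insert x (d.getD x 0 + 1))
            (PySem.Dict.empty.insert last.1 (1 : Int)) with hC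
      set cnt : Int := 1 + (((tl ++ [last]).map Prod.fst).count c.1 : Int) with hcnt2
      have : C.getD c.1 0 + 1 = cnt := by rw [hcnt]; try rw [htl]
      rw [this]
      split_ifs <;> simp_all

-- Port B computes the reference recursion.
lemma pvB_eq (hand : List (String × String)) (h : hand ≠ []) : ofAKind_alt hand = pvG hand := by
  have hlen : 1 ≤ hand.length := List.length_pos_iff.mpr h
  unfold ofAKind_alt
  have hget : PySem.List.pyGet? hand (-1) = some (hand.getLast h) := by
    simp only [PySem.List.pyGet?, PySem.List.pyIdx?]
    rw [if_neg (by omega), if_pos (by omega : -(hand.length : Int) ≤ -1)]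
    simp only [Option.bind_some]
    rw [List.getLast_eq_getElem, List.getElem?_eq_getElem (by omega)]
    norm_num
  have hslice : PySem.List.slice hand none (some (-1)) = hand.dropLast := by
    simp only [PySem.List.slice, PySem.List.clampIdx]
    rw [if_pos (by omega : (-1 : Int) < 0), if_neg (by omega : ¬ ((hand.length : Int) + -1 < 0))]
    rw [List.dropLast_eq_take]
    congr 1
    omega
  rw [hget, hslice]
  simp only []
  rw [pvB_inv (hand.getLast h) hand.dropLast]
  rw [List.dropLast_concat_getLast h]

-- ===== VERDICT (by name: the statement is the Claim_ definition above) =====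
theorem ofAKind_spec : Claim_equal_ofAKind := by
  intro hand _ hpre
  unfold Spec_ofAKind
  have h : hand ≠ [] := by
    intro he
    rw [he] at hpre
    exact absurd hpre (by simp [Pre_ofAKind])
  rw [pvA_eq hand h, pvB_eq hand h]
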